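-- pv_equiv track=rewrite | github.com/sbz/coding-prep | largest.py | find_largest_linear
-- ===== SOURCE A (Python) =====
-- def find_largest_linear(array, n):
--     """
--     Time O(n)
--     Space O(n)
--     """
--     size = len(array)
--     if size == 0 or n > size:
--         return None
--
--     maxs = []
--     current = array[0]
--
--     for number in array[1:]:
--         if n > 0 and number > current:
--             maxs.append(number)
--             current = number
--
--     return maxs[n]
-- ===== SOURCE B (Python) =====
-- def find_largest_linear(array, n):
--     size = len(array)
--     if size == 0 or n > size:
--         return None
--
--     maxs = [array[i] for i in range(1, size) if n > 0 and array[i] > max(array[:i])]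
--
--     return maxs[n]
-- ===== Notes on version B (the rewrite author's own statement) =====
-- stated objective: alternative
-- what changed: A's single pass maintaining a scalar running maximum and an appended list is replaced by a stateless index comprehension that recomputes the prefix maximum max(array[:i]) for each position and keeps array[i] exactly at the strict-record positions.
import Mathlib
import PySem

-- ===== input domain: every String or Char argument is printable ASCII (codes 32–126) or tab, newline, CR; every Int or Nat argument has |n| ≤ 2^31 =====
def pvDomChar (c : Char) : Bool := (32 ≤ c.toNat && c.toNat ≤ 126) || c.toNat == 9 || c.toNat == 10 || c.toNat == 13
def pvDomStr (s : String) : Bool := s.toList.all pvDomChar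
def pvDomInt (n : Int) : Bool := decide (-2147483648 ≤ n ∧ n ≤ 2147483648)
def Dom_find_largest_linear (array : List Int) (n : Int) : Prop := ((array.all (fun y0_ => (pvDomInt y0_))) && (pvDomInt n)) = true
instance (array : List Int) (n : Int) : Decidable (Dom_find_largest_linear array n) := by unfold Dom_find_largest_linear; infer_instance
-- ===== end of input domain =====

-- B replaces A's single pass with a running scalar by a stateless comprehension recomputing each prefix maximum (alternative decomposition, not faster).

-- ===== PORT A =====
def find_largest_linear (array : List Int) (n : Int) : Option Int :=
  let size : Int := array.length
  if size = 0 ∨ n > size then none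
  else
    -- maxs = []; current = array[0]; for number in array[1:]: …; return maxs[n]
    let st := (PySem.List.slice array (some 1) none).foldl
      (fun (p : List Int × Int) number =>
        if n > 0 ∧ number > p.2 then (p.1 ++ [number], number) else p)
      ([], PySem.List.pyGetD array 0 0)
    PySem.List.pyGet? st.1 n

-- ===== PORT B =====
def find_largest_linear_alt (array : List Int) (n : Int) : Option Int :=
  let size : Int := array.length
  if size = 0 ∨ n > size then none
  else
    -- maxs = [array[i] for i in range(1, size) if n > 0 and array[i] > max(array[:i])]
    let maxs := ((PySem.List.pyRange 1 size 1).filter (fun i =>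
        decide (n > 0 ∧
          (PySem.List.max? (PySem.List.slice array (some 0) (some i)) (fun y => y)).getD 0
            < PySem.List.pyGetD array i 0))).map
      (fun i => PySem.List.pyGetD array i 0)
    PySem.List.pyGet? maxs n

-- ===== PRECONDITION & SPEC =====
-- number of strict record positions i ≥ 1 (array[i] greater than every earlier element)
def pvRecordCount (array : List Int) : Nat :=
  (List.range array.length).countP
    (fun i => 0 < i && (List.range i).all (fun j => array.getD j 0 < array.getD i 0))

-- Pre_ excludes exactly the inputs on which A raises IndexError at maxs[n]
-- (n ≤ 0, or n not smaller than the number of strict records); everywhere else A returns.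
def Pre_find_largest_linear (array : List Int) (n : Int) : Prop :=
  array = [] ∨ (array.length : Int) < n ∨ (0 < n ∧ n < (pvRecordCount array : Int))
instance (array : List Int) (n : Int) : Decidable (Pre_find_largest_linear array n) := by
  unfold Pre_find_largest_linear; infer_instance

def pvWitness_find_largest_linear : List Int × Int := ([1, 3, 2, 5, 4], 1)

def Spec_find_largest_linear (array : List Int) (n : Int) (out : Option Int) : Prop := out = find_largest_linear_alt array n
instance (array : List Int) (n : Int) (out : Option Int) : Decidable (Spec_find_largest_linear array n out) := by unfold Spec_find_largest_linear; infer_instance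

-- ===== CLAIM (what is proved, stated in full; the proofs are below) =====
def Claim_equal_find_largest_linear : Prop := ∀ (array : List Int) (n : Int), Dom_find_largest_linear array n → Pre_find_largest_linear array n → Spec_find_largest_linear array n (find_largest_linear array n)

-- ===== LEMMAS AND PROOFS =====

-- common description of the record list
def pvRecords (cur : Int) : List Int → List Int
  | [] => []
  | x :: xs => if cur < x then x :: pvRecords x xs else pvRecords cur xs

theorem pvA_fold (n : Int) (hn : 0 < n) :
    ∀ (rest acc : List Int) (cur : Int),
      (rest.foldl
        (fun (p : List Int × Int) number =>
          if n > 0 ∧ number > p.2 then (p.1 ++ [number], number) else p)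
        (acc, cur)).1 = acc ++ pvRecords cur rest := by
  intro rest
  induction rest with
  | nil => intro acc cur; simp [pvRecords]
  | cons x xs ih =>
    intro acc cur
    rw [List.foldl_cons]
    by_cases h : cur < x
    · rw [if_pos ⟨hn, h⟩, ih, pvRecords, if_pos h]
      simp
    · rw [if_neg (fun hc => h hc.2), ih, pvRecords, if_neg h]

theorem pvA_fold_neg (n : Int) (hn : ¬ 0 < n) :
    ∀ (rest acc : List Int) (cur : Int),
      (rest.foldl
        (fun (p : List Int × Int) number =>
          if n > 0 ∧ number > p.2 then (p.1 ++ [number], number) else p)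
        (acc, cur)).1 = acc := by
  intro rest
  induction rest with
  | nil => intro acc cur; rfl
  | cons x xs ih =>
    intro acc cur
    rw [List.foldl_cons, if_neg (fun hc => hn hc.1), ih]

theorem pvB_nat (rest : List Int) :
    ∀ (a0 : Int),
      (((List.range rest.length).filter
          (fun k => decide ((rest.take k).foldl max a0 < rest.getD k 0))).map
        (fun k => rest.getD k 0)) = pvRecords a0 rest := by
  induction rest with
  | nil => intro a0; simp [pvRecords]
  | cons x xs ih =>
    intro a0
    rw [List.length_cons, List.range_succ_eq_map, List.filter_cons]
    have hf : ((fun k => decide (((x :: xs).take k).foldl max a0 < (x :: xs).getD k 0)) ∘ Nat.succ)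
        = (fun k => decide ((xs.take k).foldl max (max a0 x) < xs.getD k 0)) := by
      funext k
      simp [Function.comp, List.take_succ_cons]
    have hg : ((fun k => (x :: xs).getD k 0) ∘ Nat.succ) = (fun k => xs.getD k 0) := by
      funext k
      simp [Function.comp]
    by_cases h : a0 < x
    · rw [if_pos (by simp [h])]
      rw [List.map_cons, List.filter_map, List.map_map, hf, hg, max_eq_right h.le, ih]
      simp [pvRecords, h]
    · rw [if_neg (by simp [h])]
      rw [List.filter_map, List.map_map, hf, hg, max_eq_left (le_of_not_gt h), ih]
      simp [pvRecords, h]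

-- ===== VERDICT (by name: the statement is the Claim_ definition above) =====
theorem find_largest_linear_spec : Claim_equal_find_largest_linear := by
  intro array n _ _
  unfold Spec_find_largest_linear find_largest_linear find_largest_linear_alt
  dsimp only
  split_ifs with hg
  · rfl
  · congr 1
    cases array with
    | nil => simp at hg
    | cons a0 rest =>
      by_cases hn : 0 < n
      · rw [PySem.List.slice_from_one]
        simp only [List.tail_cons]
        rw [pvA_fold n hn rest [] (PySem.List.pyGetD (a0 :: rest) 0 0), List.nil_append]
        rw [PySem.List.pyGetD_zero_cons, ← pvB_nat rest a0]
        have h2 : (((a0 :: rest).length : Int) - 1).toNat = rest.length := by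
          push_cast [List.length_cons]
          omega
        rw [PySem.List.pyRange_one, h2, List.filter_map, List.map_map]
        congr 1
        · funext k
          simp only [Function.comp]
          have h1 : (1 : Int) + (k : Int) = ((k + 1 : Nat) : Int) := by push_cast; ring
          rw [h1, PySem.List.pyGetD_natCast]
          simp
        · congr 1
          funext k
          simp only [Function.comp]
          have h1 : (1 : Int) + (k : Int) = ((k + 1 : Nat) : Int) := by push_cast; ring
          simp only [h1]
          rw [PySem.List.slice_zero_start, PySem.List.slice_to_natCast,
            PySem.List.pyGetD_natCast]
          simp only [List.take_succ_cons, PySem.List.max?_id_cons, Option.getD_some,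
            List.getD_cons_succ]
          simp [hn]
      · rw [pvA_fold_neg n hn]
        have hB : List.filter (fun i =>
            decide (n > 0 ∧
              (PySem.List.max? (PySem.List.slice (a0 :: rest) (some 0) (some i)) (fun y => y)).getD 0
                < PySem.List.pyGetD (a0 :: rest) i 0))
            (PySem.List.pyRange 1 ((a0 :: rest).length : Int) 1) = [] := by
          apply List.filter_eq_nil_iff.mpr
          intro i _
          simp [hn]
        rw [hB]
        rfl
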